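-- pv_equiv track=rewrite | github.com/andemar-cursos/c.Ultimate_phyton | Section5/15-ejercicio.py | list_with_highest_value
-- ===== SOURCE A (Python) =====
-- def list_with_highest_value(tuple_list):
--     highest_numer = 0
--     ordered_list = []
--
--     for tuple_element in tuple_list:
--         if tuple_element[1] == highest_numer:
--             ordered_list.append(tuple_element)
--         elif tuple_element[1] > highest_numer:
--             ordered_list = [tuple_element]
--             highest_numer = tuple_element[1]
--
--     return ordered_list
-- ===== SOURCE B (Python) =====
-- def list_with_highest_value(tuple_list):
--     m = max((t[1] for t in tuple_list), default=0)
--     m = max(m, 0)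
--     return [t for t in tuple_list if t[1] == m]
-- ===== Notes on version B (the rewrite author's own statement) =====
-- stated objective: simpler
-- what changed: Replaces A's single-pass running-max-with-reset accumulator by two separate passes: compute the maximum second component floored at 0, then filter the list for tuples attaining it.
import Mathlib
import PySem

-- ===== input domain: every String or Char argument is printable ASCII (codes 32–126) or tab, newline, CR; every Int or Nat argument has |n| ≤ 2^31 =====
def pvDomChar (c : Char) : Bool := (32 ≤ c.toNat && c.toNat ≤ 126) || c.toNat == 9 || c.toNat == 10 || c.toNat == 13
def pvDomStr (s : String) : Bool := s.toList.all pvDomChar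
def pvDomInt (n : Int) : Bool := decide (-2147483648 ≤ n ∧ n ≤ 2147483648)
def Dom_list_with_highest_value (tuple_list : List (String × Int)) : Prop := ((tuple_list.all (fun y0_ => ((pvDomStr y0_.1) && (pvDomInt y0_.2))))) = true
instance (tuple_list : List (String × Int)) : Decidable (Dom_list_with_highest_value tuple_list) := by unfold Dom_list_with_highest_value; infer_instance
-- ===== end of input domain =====

-- B replaces A's one-pass running-max-with-reset by two passes (max of seconds floored at 0, then filter); objective: simpler.


-- ===== PORT A =====
-- A's loop: state (highest_numer, ordered_list); append on equal, reset on greater.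
def list_with_highest_value (tuple_list : List (String × Int)) : List (String × Int) :=
  (tuple_list.foldl
    (fun (s : Int × List (String × Int)) t =>
      if t.2 = s.1 then (s.1, s.2 ++ [t])
      else if t.2 > s.1 then (t.2, [t])
      else s)
    (0, [])).2

-- ===== PORT B =====
-- B: max of second components (default 0 on empty), floored at 0, then a filter.
def list_with_highest_value_alt (tuple_list : List (String × Int)) : List (String × Int) :=
  let m0 : Int := match PySem.List.max? (tuple_list.map Prod.snd) (fun y => y) with
    | none => 0
    | some v => v
  let m : Int := max m0 0
  tuple_list.filter (fun t => t.2 = m)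

-- ===== PRECONDITION & SPEC =====
def Spec_list_with_highest_value (tuple_list : List (String × Int)) (out : List (String × Int)) : Prop := out = list_with_highest_value_alt tuple_list
instance (tuple_list : List (String × Int)) (out : List (String × Int)) : Decidable (Spec_list_with_highest_value tuple_list out) := by unfold Spec_list_with_highest_value; infer_instance

-- ===== CLAIM (what is proved, stated in full; the proofs are below) =====
def Claim_equal_list_with_highest_value : Prop := ∀ (tuple_list : List (String × Int)), Dom_list_with_highest_value tuple_list → Spec_list_with_highest_value tuple_list (list_with_highest_value tuple_list)

-- ===== LEMMAS AND PROOFS =====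

-- pull an outer max into the foldl seed
theorem foldl_max_max (t : List Int) : ∀ (h a : Int), max (t.foldl max h) a = t.foldl max (max h a) := by
  induction t with
  | nil => intro h a; simp
  | cons x xs ih =>
    intro h a
    simp only [List.foldl_cons]
    rw [ih (max h x) a, max_right_comm]

-- the seed is below the running max
theorem le_foldl_max_seed (t : List Int) : ∀ (a : Int), a ≤ t.foldl max a := by
  induction t with
  | nil => intro a; simp
  | cons x xs ih =>
    intro a
    simp only [List.foldl_cons]
    exact le_trans (le_max_left a x) (ih (max a x))

-- invariant of A's fold: final max is the running max of the seed and all seconds,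
-- and the accumulator is (old acc if the max never moved) ++ filter on the final max
theorem fold_invariant (l : List (String × Int)) :
    ∀ (h : Int) (acc : List (String × Int)),
    (l.foldl
      (fun (s : Int × List (String × Int)) t =>
        if t.2 = s.1 then (s.1, s.2 ++ [t])
        else if t.2 > s.1 then (t.2, [t])
        else s)
      (h, acc)) =
    ((l.map Prod.snd).foldl max h,
      (if (l.map Prod.snd).foldl max h = h then acc else []) ++
        l.filter (fun t => t.2 = (l.map Prod.snd).foldl max h)) := by
  induction l with
  | nil => intro h acc; simp
  | cons x xs ih =>
    intro h acc
    simp only [List.foldl_cons, List.map_cons, List.filter_cons]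
    by_cases h1 : x.2 = h
    · simp only [h1, if_true, gt_iff_lt, lt_self_iff_false, if_false, max_self]
      rw [ih h (acc ++ [x])]
      by_cases h2 : (xs.map Prod.snd).foldl max h = h
      · simp [h2]
      · simp [h2, Ne.symm h2]
    · simp only [if_neg h1, gt_iff_lt]
      by_cases h2 : h < x.2
      · simp only [if_pos h2]
        rw [ih x.2 [x]]
        have hm : max h x.2 = x.2 := max_eq_right (le_of_lt h2)
        simp only [hm]
        have hx2 : x.2 ≤ (xs.map Prod.snd).foldl max x.2 := le_foldl_max_seed _ x.2
        have hne : (xs.map Prod.snd).foldl max x.2 ≠ h := by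
          intro he; rw [he] at hx2; exact absurd hx2 (not_le.mpr h2)
        by_cases h3 : (xs.map Prod.snd).foldl max x.2 = x.2
        · simp [h3, h1]
        · simp [h3, hne, Ne.symm h3]
      · simp only [if_neg h2]
        rw [ih h acc]
        have hm : max h x.2 = h := max_eq_left (le_of_not_gt h2)
        simp only [hm]
        have hne : x.2 ≠ (xs.map Prod.snd).foldl max h := by
          intro he
          have := le_foldl_max_seed (xs.map Prod.snd) h
          rw [← he] at this
          exact h1 (le_antisymm (le_of_not_gt h2) this)
        simp [hne]

-- B's value of m equals the running max of 0 over the seconds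
theorem alt_m_eq (l : List (String × Int)) :
    max (match PySem.List.max? (l.map Prod.snd) (fun y => y) with
          | none => 0
          | some v => v) 0
    = (l.map Prod.snd).foldl max 0 := by
  cases l with
  | nil => simp [PySem.List.max?]
  | cons x xs =>
    rw [List.map_cons, PySem.List.max?_id_cons]
    simp only []
    rw [foldl_max_max (xs.map Prod.snd) x.2 0, List.foldl_cons]
    rw [max_comm x.2 0]

-- ===== VERDICT (by name: the statement is the Claim_ definition above) =====
theorem list_with_highest_value_spec : Claim_equal_list_with_highest_value := by
  intro l _
  unfold Spec_list_with_highest_value list_with_highest_value list_with_highest_value_alt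
  rw [fold_invariant l 0 []]
  simp only [alt_m_eq l]
  split <;> simp
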